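-- pv_equiv track=rewrite | github.com/DMIRLAB-Group/CDMIR | causaldmir/discovery/funtional_based/LHM_ICML/InferCausalOrder.py | GetIndexByObserved
-- ===== SOURCE A (Python) =====
-- def GetIndexByObserved(LatentIndex):
--     LatentName=list(LatentIndex.keys())
--     result={}
--     for i in LatentName:
--         dex1 = LatentIndex[i][0]
--         dex2 = LatentIndex[i][1]
--         while dex1 in LatentName:
--             dex1=LatentIndex[dex1][0]
--         while dex2 in LatentName:
--             dex2=LatentIndex[dex2][1]
--         result[i]=[dex1,dex2]
--
--     return result
-- ===== SOURCE B (Python) =====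
-- def GetIndexByObserved(LatentIndex):
--     # Memoized chain resolution: each latent key's pointer chain is walked once,
--     # then every node on the walked path is cached with its observed endpoint.
--     cache = ({}, {})
--
--     def resolve(d, idx):
--         memo = cache[idx]
--         chain = []
--         while d in LatentIndex and d not in memo:
--             chain.append(d)
--             d = LatentIndex[d][idx]
--         endpoint = memo.get(d, d)
--         for c in chain:
--             memo[c] = endpoint
--         return endpoint
--
--     return {k: [resolve(LatentIndex[k][0], 0), resolve(LatentIndex[k][1], 1)]
--             for k in LatentIndex}
-- ===== Notes on version B (the rewrite author's own statement) =====
-- stated objective: faster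
-- what changed: B memoizes the observed endpoint of every node visited on a pointer chain (path compression with two caches, one per direction), so each chain is walked once instead of re-walking chains from scratch for every key.
import Mathlib
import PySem

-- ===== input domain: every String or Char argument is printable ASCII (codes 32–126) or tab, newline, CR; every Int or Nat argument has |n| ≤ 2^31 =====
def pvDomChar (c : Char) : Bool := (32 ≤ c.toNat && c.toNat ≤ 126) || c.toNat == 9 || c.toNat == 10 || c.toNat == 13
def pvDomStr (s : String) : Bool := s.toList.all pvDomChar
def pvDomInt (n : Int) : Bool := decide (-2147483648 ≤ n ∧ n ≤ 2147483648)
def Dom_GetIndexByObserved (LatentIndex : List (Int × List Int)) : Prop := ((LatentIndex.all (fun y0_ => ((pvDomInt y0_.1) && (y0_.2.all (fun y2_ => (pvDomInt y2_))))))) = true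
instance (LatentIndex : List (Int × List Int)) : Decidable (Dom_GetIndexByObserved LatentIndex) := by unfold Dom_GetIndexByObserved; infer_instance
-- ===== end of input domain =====

-- B memoizes resolved endpoints (path compression), so each pointer chain is walked once; equivalence is on the
-- return value (neither version mutates its argument).

-- Python dict access LatentIndex[d] on the association list (keys of a Python dict are unique, so first match is exact);
-- shared by both ports, since both Pythons perform the same primitive lookup.
def pvLook (L : List (Int × List Int)) (d : Int) : Option (List Int) :=
  (L.find? (fun p => p.1 == d)).map (·.2)

-- ===== PORT A =====
-- 'while dex in LatentName: dex = LatentIndex[dex][idx]'.  'dex in LatentName' is exactly 'pvLook L dex ≠ none'.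
-- The while-loop is given fuel |L|+1; under Pre_ every chain leaves the key set within |L| steps, so the fuel is
-- never exhausted (a totality guard only).  'v.getD idx 0' is v[idx]; Pre_ guarantees 2 ≤ v.length so it is exact.
def chase (L : List (Int × List Int)) (idx : Nat) : Nat → Int → Int
  | 0, d => d
  | fuel + 1, d =>
    match pvLook L d with
    | some v => chase L idx fuel (v.getD idx 0)
    | none => d

-- the body of A's 'for i in LatentName' loop: result[i] = [dex1, dex2]
def aBody (L : List (Int × List Int)) (result : PySem.Dict Int (List Int)) (i : Int) :
    PySem.Dict Int (List Int) :=
  let v := (pvLook L i).getD []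
  let dex1 := chase L 0 (L.length + 1) (v.getD 0 0)
  let dex2 := chase L 1 (L.length + 1) (v.getD 1 0)
  result.insert i [dex1, dex2]

def GetIndexByObserved (LatentIndex : List (Int × List Int)) : List (Int × List Int) :=
  ((LatentIndex.map (·.1)).foldl (aBody LatentIndex) PySem.Dict.empty).items

-- ===== PORT B =====
-- after B's while loop: endpoint = memo.get(d, d); every node on the walked path is cached
def finishB (memo : PySem.Dict Int Int) (d : Int) (chain : List Int) :
    Int × PySem.Dict Int Int :=
  let e := memo.getD d d
  (e, chain.foldl (fun m c => m.insert c e) memo)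

-- B's 'while d in LatentIndex and d not in memo' loop, with the same fuel guard as A's port
def resolveB (L : List (Int × List Int)) (idx : Nat) :
    Nat → PySem.Dict Int Int → Int → List Int → Int × PySem.Dict Int Int
  | 0, memo, d, chain => finishB memo d chain
  | fuel + 1, memo, d, chain =>
    if (pvLook L d).isSome && !(memo.contains d) then
      resolveB L idx fuel memo (((pvLook L d).getD []).getD idx 0) (chain ++ [d])
    else finishB memo d chain

-- the body of B's dict comprehension, threading the two memo tables
def bBody (L : List (Int × List Int))
    (st : PySem.Dict Int (List Int) × PySem.Dict Int Int × PySem.Dict Int Int) (k : Int) :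
    PySem.Dict Int (List Int) × PySem.Dict Int Int × PySem.Dict Int Int :=
  let v := (pvLook L k).getD []
  let r1 := resolveB L 0 (L.length + 1) st.2.1 (v.getD 0 0) []
  let r2 := resolveB L 1 (L.length + 1) st.2.2 (v.getD 1 0) []
  (st.1.insert k [r1.1, r2.1], r1.2, r2.2)

def GetIndexByObserved_alt (LatentIndex : List (Int × List Int)) : List (Int × List Int) :=
  ((LatentIndex.map (·.1)).foldl (bBody LatentIndex)
      (PySem.Dict.empty, PySem.Dict.empty, PySem.Dict.empty)).1.items

-- ===== PRECONDITION & SPEC =====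
-- one pointer-following step on the input's chain graph (identity off the key set); used only to STATE Pre_
def pvStep (L : List (Int × List Int)) (idx : Nat) (d : Int) : Int :=
  match pvLook L d with
  | some v => v.getD idx 0
  | none => d

-- the pointer chain starting at d leaves the key set within |L| steps
def pvEscapes (L : List (Int × List Int)) (idx : Nat) (d : Int) : Prop :=
  ∃ m ∈ List.range (L.length + 1), pvLook L ((pvStep L idx)^[m] d) = none

-- Pre_ excludes exactly where Python A does not return: a value list shorter than 2 raises IndexError, and a cyclic
-- pointer chain makes A's while-loop diverge.  (By pigeonhole an acyclic chain of keys leaves the key set within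
-- |L| steps, so the bound loses nothing.)
def Pre_GetIndexByObserved (LatentIndex : List (Int × List Int)) : Prop :=
  (∀ p ∈ LatentIndex, 2 ≤ p.2.length) ∧
  (∀ p ∈ LatentIndex, pvEscapes LatentIndex 0 p.1) ∧
  (∀ p ∈ LatentIndex, pvEscapes LatentIndex 1 p.1)
instance (LatentIndex : List (Int × List Int)) : Decidable (Pre_GetIndexByObserved LatentIndex) := by
  unfold Pre_GetIndexByObserved pvEscapes; infer_instance

def pvWitness_GetIndexByObserved : List (Int × List Int) := [(0, [5, 6]), (1, [0, 2])]

def Spec_GetIndexByObserved (LatentIndex : List (Int × List Int)) (out : List (Int × List Int)) : Prop := out = GetIndexByObserved_alt LatentIndex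
instance (LatentIndex : List (Int × List Int)) (out : List (Int × List Int)) : Decidable (Spec_GetIndexByObserved LatentIndex out) := by unfold Spec_GetIndexByObserved; infer_instance

-- ===== CLAIM (what is proved, stated in full; the proofs are below) =====
def Claim_equal_GetIndexByObserved : Prop := ∀ (LatentIndex : List (Int × List Int)), Dom_GetIndexByObserved LatentIndex → Pre_GetIndexByObserved LatentIndex → Spec_GetIndexByObserved LatentIndex (GetIndexByObserved LatentIndex)

-- ===== LEMMAS AND PROOFS =====

-- the fully resolved endpoint of d's chain (|L|+1 steps always suffice under Pre_)
def pvE (L : List (Int × List Int)) (idx : Nat) (d : Int) : Int :=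
  (pvStep L idx)^[L.length + 1] d

theorem step_fix {L : List (Int × List Int)} {idx : Nat} {d : Int}
    (h : pvLook L d = none) : pvStep L idx d = d := by
  simp [pvStep, h]

theorem iterate_fix {L : List (Int × List Int)} {idx : Nat} {d : Int}
    (h : pvLook L d = none) : ∀ m, (pvStep L idx)^[m] d = d := by
  intro m
  induction m with
  | zero => rfl
  | succ m ih => rw [Function.iterate_succ_apply, step_fix h, ih]

theorem stab {L : List (Int × List Int)} {idx : Nat} {d : Int} {m : Nat}
    (h : pvLook L ((pvStep L idx)^[m] d) = none) :
    ∀ f, m ≤ f → (pvStep L idx)^[f] d = (pvStep L idx)^[m] d := by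
  intro f hf
  have : f = (f - m) + m := by omega
  rw [this, Function.iterate_add_apply, iterate_fix h]

theorem escapes_notkey {L : List (Int × List Int)} {idx : Nat} {d : Int}
    (h : pvEscapes L idx d) :
    ∀ f, L.length ≤ f → pvLook L ((pvStep L idx)^[f] d) = none := by
  obtain ⟨m, hm, hnone⟩ := h
  intro f hf
  rw [stab hnone f (by simp [List.mem_range] at hm; omega)]
  exact hnone

theorem look_some_key {L : List (Int × List Int)} {d : Int} {v : List Int}
    (h : pvLook L d = some v) : ∃ p ∈ L, p.1 = d := by
  unfold pvLook at h
  cases hf : L.find? (fun p => p.1 == d) with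
  | none => rw [hf] at h; simp at h
  | some p =>
    refine ⟨p, List.mem_of_find?_eq_some hf, ?_⟩
    have := List.find?_some hf
    simpa using this

-- under Pre_'s escape condition on keys, EVERY starting point escapes
theorem escapes_any {L : List (Int × List Int)} {idx : Nat}
    (h : ∀ p ∈ L, pvEscapes L idx p.1) (d : Int) : pvEscapes L idx d := by
  cases hl : pvLook L d with
  | none => exact ⟨0, by simp, hl⟩
  | some v =>
    obtain ⟨p, hp, hpd⟩ := look_some_key hl
    exact hpd ▸ h p hp

theorem chase_eq_iter (L : List (Int × List Int)) (idx : Nat) :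
    ∀ fuel d, chase L idx fuel d = (pvStep L idx)^[fuel] d := by
  intro fuel
  induction fuel with
  | zero => intro d; rfl
  | succ fuel ih =>
    intro d
    rw [Function.iterate_succ_apply]
    cases h : pvLook L d with
    | none =>
      simp only [chase, h]
      rw [step_fix h, iterate_fix h]
    | some v =>
      simp only [chase, h]
      rw [ih]
      have : pvStep L idx d = v.getD idx 0 := by simp [pvStep, h]
      rw [this]

-- invariant on a memo table: every cached value is the true endpoint of its key
def MemoInv (L : List (Int × List Int)) (idx : Nat) (memo : PySem.Dict Int Int) : Prop :=
  ∀ k v, memo.get? k = some v → v = pvE L idx k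

theorem MemoInv_fold {L : List (Int × List Int)} {idx : Nat} {e : Int} :
    ∀ (chain : List Int) (memo : PySem.Dict Int Int), MemoInv L idx memo →
      (∀ c ∈ chain, pvE L idx c = e) →
      MemoInv L idx (chain.foldl (fun m c => m.insert c e) memo) := by
  intro chain
  induction chain with
  | nil => intro memo hm _; exact hm
  | cons c cs ih =>
    intro memo hm hch
    simp only [List.foldl_cons]
    refine ih _ ?_ (fun x hx => hch x (by simp [hx]))
    intro k v hk
    rw [PySem.Dict.get?_insert] at hk
    by_cases hkc : k = c
    · rw [if_pos hkc] at hk; cases hk; rw [hkc]; exact (hch c (by simp)).symm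
    · rw [if_neg hkc] at hk; exact hm k v hk

theorem finishB_correct {L : List (Int × List Int)} {idx : Nat}
    (memo : PySem.Dict Int Int) (d : Int) (chain : List Int)
    (hm : MemoInv L idx memo)
    (hch : ∀ c ∈ chain, pvE L idx c = pvE L idx d)
    (hd : memo.get? d = none → pvE L idx d = d) :
    (finishB memo d chain).1 = pvE L idx d ∧ MemoInv L idx (finishB memo d chain).2 := by
  have he : memo.getD d d = pvE L idx d := by
    rw [PySem.Dict.getD_eq_get?_getD]
    cases hg : memo.get? d with
    | none => simp [hd hg]
    | some v => simpa using hm d v hg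
  constructor
  · simp [finishB, he]
  · simp only [finishB, he]
    exact MemoInv_fold chain memo hm hch

theorem resolveB_correct {L : List (Int × List Int)} {idx : Nat} :
    ∀ (fuel : Nat) (memo : PySem.Dict Int Int) (d : Int) (chain : List Int),
      fuel ≤ L.length + 1 →
      MemoInv L idx memo →
      (∀ c ∈ chain, pvE L idx c = pvE L idx d) →
      pvLook L ((pvStep L idx)^[fuel] d) = none →
      (resolveB L idx fuel memo d chain).1 = pvE L idx d ∧
        MemoInv L idx (resolveB L idx fuel memo d chain).2 := by
  intro fuel
  induction fuel with
  | zero =>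
    intro memo d chain _ hm hch h0
    simp only [Function.iterate_zero, id_eq] at h0
    exact finishB_correct memo d chain hm hch
      (fun _ => iterate_fix h0 (L.length + 1))
  | succ fuel ih =>
    intro memo d chain hle hm hch hnone
    by_cases hc : ((pvLook L d).isSome && !(memo.contains d)) = true
    · obtain ⟨h1, _⟩ : (pvLook L d).isSome = true ∧ !(memo.contains d) = true := by
        simpa using hc
      obtain ⟨v, hv⟩ := Option.isSome_iff_exists.mp h1
      have hstep : pvStep L idx d = v.getD idx 0 := by simp [pvStep, hv]
      have hsucc : (pvStep L idx)^[fuel] (v.getD idx 0) = (pvStep L idx)^[fuel + 1] d := by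
        rw [Function.iterate_succ_apply, hstep]
      have hEd : pvE L idx (v.getD idx 0) = pvE L idx d := by
        unfold pvE
        have e1 : (pvStep L idx)^[L.length + 1] (v.getD idx 0)
            = (pvStep L idx)^[L.length + 1 + 1] d := by
          rw [← hstep, ← Function.iterate_succ_apply]
        rw [e1, stab (m := fuel + 1) hnone (L.length + 1 + 1) (by omega),
          stab (m := fuel + 1) hnone (L.length + 1) (by omega)]
      have hrec := ih memo (v.getD idx 0) (chain ++ [d]) (by omega) hm
        (by
          intro c hcm
          rw [hEd]
          rcases List.mem_append.mp hcm with h | h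
          · exact hch c h
          · simp at h; subst h; rfl)
        (by rw [hsucc]; exact hnone)
      have hun : resolveB L idx (fuel + 1) memo d chain
          = resolveB L idx fuel memo (((pvLook L d).getD []).getD idx 0) (chain ++ [d]) := by
        simp only [resolveB, hc, if_true]
      rw [hun]
      simp only [hv, Option.getD_some]
      rw [← hEd]
      exact hrec
    · have hcf : ((pvLook L d).isSome && !(memo.contains d)) = false :=
        Bool.not_eq_true _ ▸ hc
      have hun : resolveB L idx (fuel + 1) memo d chain = finishB memo d chain := by
        simp only [resolveB, hcf, Bool.false_eq_true, if_false]
      rw [hun]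
      refine finishB_correct memo d chain hm hch ?_
      intro hg
      cases hl : pvLook L d with
      | none => exact iterate_fix hl (L.length + 1)
      | some v =>
        exfalso
        have hcont : memo.contains d = (memo.get? d).isSome :=
          PySem.Dict.contains_eq_isSome_get? memo d
        rw [hg] at hcont
        simp [hl, hcont] at hcf

theorem emptyInv (L : List (Int × List Int)) (idx : Nat) :
    MemoInv L idx PySem.Dict.empty := by
  intro k v h
  rw [PySem.Dict.get?_empty] at h
  cases h

theorem foldEq {L : List (Int × List Int)}
    (H0 : ∀ d, pvLook L ((pvStep L 0)^[L.length + 1] d) = none)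
    (H1 : ∀ d, pvLook L ((pvStep L 1)^[L.length + 1] d) = none) :
    ∀ (ks : List Int) (res : PySem.Dict Int (List Int)) (m1 m2 : PySem.Dict Int Int),
      MemoInv L 0 m1 → MemoInv L 1 m2 →
      ks.foldl (aBody L) res = (ks.foldl (bBody L) (res, m1, m2)).1 := by
  intro ks
  induction ks with
  | nil => intro res m1 m2 _ _; rfl
  | cons k ks ih =>
    intro res m1 m2 hm1 hm2
    simp only [List.foldl_cons]
    have h1 := resolveB_correct (L := L) (idx := 0) (L.length + 1) m1
      (((pvLook L k).getD []).getD 0 0) [] (le_refl _) hm1 (by simp) (H0 _)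
    have h2 := resolveB_correct (L := L) (idx := 1) (L.length + 1) m2
      (((pvLook L k).getD []).getD 1 0) [] (le_refl _) hm2 (by simp) (H1 _)
    have hb : ks.foldl (bBody L) (bBody L (res, m1, m2) k)
        = ks.foldl (bBody L) (aBody L res k,
            (resolveB L 0 (L.length + 1) m1 (((pvLook L k).getD []).getD 0 0) []).2,
            (resolveB L 1 (L.length + 1) m2 (((pvLook L k).getD []).getD 1 0) []).2) := by
      simp only [bBody, aBody]
      rw [h1.1, h2.1, chase_eq_iter, chase_eq_iter]
      rfl
    rw [hb]
    exact ih _ _ _ h1.2 h2.2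

-- ===== VERDICT (by name: the statement is the Claim_ definition above) =====
theorem GetIndexByObserved_spec : Claim_equal_GetIndexByObserved := by
  intro L _ pre
  obtain ⟨_, he0, he1⟩ := pre
  unfold Spec_GetIndexByObserved GetIndexByObserved GetIndexByObserved_alt
  have H0 : ∀ d, pvLook L ((pvStep L 0)^[L.length + 1] d) = none := fun d =>
    escapes_notkey (escapes_any he0 d) (L.length + 1) (by omega)
  have H1 : ∀ d, pvLook L ((pvStep L 1)^[L.length + 1] d) = none := fun d =>
    escapes_notkey (escapes_any he1 d) (L.length + 1) (by omega)
  rw [foldEq H0 H1 (L.map (·.1)) PySem.Dict.empty PySem.Dict.empty PySem.Dict.empty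
    (emptyInv L 0) (emptyInv L 1)]
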